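-- pv_equiv track=rewrite | github.com/akatsuyama/LigX | LigX/LigX_core.py | atomname_change_after_link_c
-- ===== SOURCE A (Python) =====
-- def atomname_change_after_link_c(atom_list,original_name_x,original_name_r):
--     if original_name_x != 'XC3g_1':
--         atom_list = ['C' if x == original_name_x else x for x in atom_list]
--     elif original_name_x == 'XC3g_1':
--         atom_list = ['XC3g_2' if x == original_name_x else x for x in atom_list]
--     atom_list = ['C' if x == 'CX_0' else x for x in atom_list]
--     atom_list = ['N' if x == 'NX_0' else x for x in atom_list]
--     for r in ['H','C','O','N','S','Cl','Br','I','P','F','D']: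
--         R_name = 'R'+r+'_1'
--         if R_name == original_name_r:
--             atom_list = [r if x == original_name_r else x for x in atom_list]
--     return atom_list
-- ===== SOURCE B (Python) =====
-- def atomname_change_after_link_c(atom_list, original_name_x, original_name_r):
--     mapping = {original_name_x: 'XC3g_2' if original_name_x == 'XC3g_1' else 'C'}
--     mapping.setdefault('CX_0', 'C')
--     mapping.setdefault('NX_0', 'N')
--     for r in ['H', 'C', 'O', 'N', 'S', 'Cl', 'Br', 'I', 'P', 'F', 'D']:
--         if 'R' + r + '_1' == original_name_r:
--             mapping.setdefault(original_name_r, r)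
--     return [mapping.get(x, x) for x in atom_list]
-- ===== Notes on version B (the rewrite author's own statement) =====
-- stated objective: simpler
-- what changed: Replaces A's four sequential list-rewrite passes plus an 11-iteration search loop over the list by building one first-wins translation dict and mapping the list once.
import Mathlib
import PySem

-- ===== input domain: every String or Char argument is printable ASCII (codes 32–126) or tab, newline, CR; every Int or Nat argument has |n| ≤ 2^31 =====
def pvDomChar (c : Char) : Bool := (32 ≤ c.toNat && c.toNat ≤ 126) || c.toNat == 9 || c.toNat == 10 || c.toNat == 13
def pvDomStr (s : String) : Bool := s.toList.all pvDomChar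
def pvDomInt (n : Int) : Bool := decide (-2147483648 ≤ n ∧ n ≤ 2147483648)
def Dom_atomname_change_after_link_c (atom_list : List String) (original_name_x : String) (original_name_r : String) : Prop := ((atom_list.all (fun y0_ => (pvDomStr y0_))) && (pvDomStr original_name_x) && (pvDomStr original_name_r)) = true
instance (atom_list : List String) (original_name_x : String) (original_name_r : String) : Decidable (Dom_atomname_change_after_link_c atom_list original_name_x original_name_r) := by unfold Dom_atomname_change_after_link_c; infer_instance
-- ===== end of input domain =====

-- B replaces A's four sequential rewrite passes over the list by one translation
-- dict built once (first-wins) and a single mapping pass: simpler, one traversal.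


-- ===== PORT A =====
-- A: pass 1 rewrites original_name_x, passes 2/3 rewrite 'CX_0'/'NX_0', then a loop
-- over the 11 element symbols rewrites original_name_r when it is 'R<r>_1'.
def atomname_change_after_link_c (atom_list : List String) (original_name_x : String) (original_name_r : String) : List String :=
  ["H", "C", "O", "N", "S", "Cl", "Br", "I", "P", "F", "D"].foldl
    (fun al r =>
      if ("R" ++ r ++ "_1") = original_name_r then
        al.map (fun x => if x = original_name_r then r else x)
      else al)
    (((if original_name_x ≠ "XC3g_1" then
          atom_list.map (fun x => if x = original_name_x then "C" else x)
        else if original_name_x = "XC3g_1" then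
          atom_list.map (fun x => if x = original_name_x then "XC3g_2" else x)
        else atom_list).map
        (fun x => if x = "CX_0" then "C" else x)).map
        (fun x => if x = "NX_0" then "N" else x))

-- ===== PORT B =====
-- B: build the translation dict (setdefault = first pass wins), then map once.
def atomname_change_after_link_c_alt (atom_list : List String) (original_name_x : String) (original_name_r : String) : List String :=
  atom_list.map (fun x =>
    (["H", "C", "O", "N", "S", "Cl", "Br", "I", "P", "F", "D"].foldl
      (fun m r =>
        if ("R" ++ r ++ "_1") = original_name_r then m.setdefault original_name_r r else m)
      (((PySem.Dict.empty.insert original_name_x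
          (if original_name_x = "XC3g_1" then "XC3g_2" else "C")).setdefault
          "CX_0" "C").setdefault "NX_0" "N")).getD x x)

-- ===== PRECONDITION & SPEC =====
def Spec_atomname_change_after_link_c (atom_list : List String) (original_name_x : String) (original_name_r : String) (out : List String) : Prop := out = atomname_change_after_link_c_alt atom_list original_name_x original_name_r
instance (atom_list : List String) (original_name_x : String) (original_name_r : String) (out : List String) : Decidable (Spec_atomname_change_after_link_c atom_list original_name_x original_name_r out) := by unfold Spec_atomname_change_after_link_c; infer_instance

-- ===== CLAIM (what is proved, stated in full; the proofs are below) =====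
def Claim_equal_atomname_change_after_link_c : Prop := ∀ (atom_list : List String) (original_name_x : String) (original_name_r : String), Dom_atomname_change_after_link_c atom_list original_name_x original_name_r → Spec_atomname_change_after_link_c atom_list original_name_x original_name_r (atomname_change_after_link_c atom_list original_name_x original_name_r)

-- ===== LEMMAS AND PROOFS =====

-- setdefault, read back through getD / contains
theorem getD_setdefault_cases {κ ν : Type} [BEq κ] [LawfulBEq κ]
    (d : PySem.Dict κ ν) (k : κ) (v : ν) (x : κ) (dflt : ν) :
    (d.setdefault k v).getD x dflt =
      if d.contains k then d.getD x dflt else (d.insert k v).getD x dflt := by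
  by_cases h : d.contains k
  · simp [PySem.Dict.setdefault_of_contains d v h, h]
  · simp only [Bool.not_eq_true] at h
    simp [PySem.Dict.setdefault_of_not_contains d v h, h]

theorem contains_setdefault {κ ν : Type} [BEq κ] [LawfulBEq κ]
    (d : PySem.Dict κ ν) (k : κ) (v : ν) (k' : κ) :
    (d.setdefault k v).contains k' = (k' == k || d.contains k') := by
  by_cases h : d.contains k
  · rw [PySem.Dict.setdefault_of_contains d v h]
    by_cases h2 : k' == k
    · simp_all [show k' = k from by simpa using h2]
    · simp_all
  · simp only [Bool.not_eq_true] at h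
    rw [PySem.Dict.setdefault_of_not_contains d v h, PySem.Dict.contains_insert]

-- A's rewrite loop is a map of the elementwise rewrite loop
theorem foldA (rs : List String) (onr : String) (al : List String) :
    rs.foldl (fun al r => if ("R" ++ r ++ "_1") = onr then al.map (fun x => if x = onr then r else x) else al) al
    = al.map (fun x => rs.foldl (fun y r => if ("R" ++ r ++ "_1") = onr then (if y = onr then r else y) else y) x) := by
  induction rs generalizing al with
  | nil => simp
  | cons r rs ih =>
    simp only [List.foldl_cons]
    by_cases h : ("R" ++ r ++ "_1") = onr
    · simp [h, ih, List.map_map]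
    · simp [h, ih]

-- elementwise equivalence: A's composed passes agree with B's dict lookup, per matching R-name
set_option maxHeartbeats 4000000 in
theorem point_eq_H (onx x : String) :
    (["H", "C", "O", "N", "S", "Cl", "Br", "I", "P", "F", "D"].foldl
      (fun y r => if ("R" ++ r ++ "_1") = "RH_1" then (if y = "RH_1" then r else y) else y)
      ((fun x => if x = "NX_0" then "N" else x)
        ((fun x => if x = "CX_0" then "C" else x)
          (if onx ≠ "XC3g_1" then (if x = onx then "C" else x)
           else if onx = "XC3g_1" then (if x = onx then "XC3g_2" else x) else x))))
    = ((["H", "C", "O", "N", "S", "Cl", "Br", "I", "P", "F", "D"].foldl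
        (fun m r => if ("R" ++ r ++ "_1") = "RH_1" then m.setdefault "RH_1" r else m)
        (((PySem.Dict.empty.insert onx
            (if onx = "XC3g_1" then "XC3g_2" else "C")).setdefault "CX_0" "C").setdefault "NX_0" "N")).getD x x) := by
  simp only [List.foldl_cons, List.foldl_nil, String.reduceAppend, String.reduceEq, reduceIte,
    ne_eq, ite_not]
  simp only [getD_setdefault_cases, contains_setdefault, PySem.Dict.contains_insert,
    PySem.Dict.contains_empty, PySem.Dict.getD_insert, PySem.Dict.getD_empty,
    beq_iff_eq, Bool.or_false, Bool.or_eq_true]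
  split_ifs <;> subst_vars <;> simp_all

set_option maxHeartbeats 4000000 in
theorem point_eq_C (onx x : String) :
    (["H", "C", "O", "N", "S", "Cl", "Br", "I", "P", "F", "D"].foldl
      (fun y r => if ("R" ++ r ++ "_1") = "RC_1" then (if y = "RC_1" then r else y) else y)
      ((fun x => if x = "NX_0" then "N" else x)
        ((fun x => if x = "CX_0" then "C" else x)
          (if onx ≠ "XC3g_1" then (if x = onx then "C" else x)
           else if onx = "XC3g_1" then (if x = onx then "XC3g_2" else x) else x))))
    = ((["H", "C", "O", "N", "S", "Cl", "Br", "I", "P", "F", "D"].foldl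
        (fun m r => if ("R" ++ r ++ "_1") = "RC_1" then m.setdefault "RC_1" r else m)
        (((PySem.Dict.empty.insert onx
            (if onx = "XC3g_1" then "XC3g_2" else "C")).setdefault "CX_0" "C").setdefault "NX_0" "N")).getD x x) := by
  simp only [List.foldl_cons, List.foldl_nil, String.reduceAppend, String.reduceEq, reduceIte,
    ne_eq, ite_not]
  simp only [getD_setdefault_cases, contains_setdefault, PySem.Dict.contains_insert,
    PySem.Dict.contains_empty, PySem.Dict.getD_insert, PySem.Dict.getD_empty,
    beq_iff_eq, Bool.or_false, Bool.or_eq_true]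
  split_ifs <;> subst_vars <;> simp_all

set_option maxHeartbeats 4000000 in
theorem point_eq_O (onx x : String) :
    (["H", "C", "O", "N", "S", "Cl", "Br", "I", "P", "F", "D"].foldl
      (fun y r => if ("R" ++ r ++ "_1") = "RO_1" then (if y = "RO_1" then r else y) else y)
      ((fun x => if x = "NX_0" then "N" else x)
        ((fun x => if x = "CX_0" then "C" else x)
          (if onx ≠ "XC3g_1" then (if x = onx then "C" else x)
           else if onx = "XC3g_1" then (if x = onx then "XC3g_2" else x) else x))))
    = ((["H", "C", "O", "N", "S", "Cl", "Br", "I", "P", "F", "D"].foldl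
        (fun m r => if ("R" ++ r ++ "_1") = "RO_1" then m.setdefault "RO_1" r else m)
        (((PySem.Dict.empty.insert onx
            (if onx = "XC3g_1" then "XC3g_2" else "C")).setdefault "CX_0" "C").setdefault "NX_0" "N")).getD x x) := by
  simp only [List.foldl_cons, List.foldl_nil, String.reduceAppend, String.reduceEq, reduceIte,
    ne_eq, ite_not]
  simp only [getD_setdefault_cases, contains_setdefault, PySem.Dict.contains_insert,
    PySem.Dict.contains_empty, PySem.Dict.getD_insert, PySem.Dict.getD_empty,
    beq_iff_eq, Bool.or_false, Bool.or_eq_true]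
  split_ifs <;> subst_vars <;> simp_all

set_option maxHeartbeats 4000000 in
theorem point_eq_N (onx x : String) :
    (["H", "C", "O", "N", "S", "Cl", "Br", "I", "P", "F", "D"].foldl
      (fun y r => if ("R" ++ r ++ "_1") = "RN_1" then (if y = "RN_1" then r else y) else y)
      ((fun x => if x = "NX_0" then "N" else x)
        ((fun x => if x = "CX_0" then "C" else x)
          (if onx ≠ "XC3g_1" then (if x = onx then "C" else x)
           else if onx = "XC3g_1" then (if x = onx then "XC3g_2" else x) else x))))
    = ((["H", "C", "O", "N", "S", "Cl", "Br", "I", "P", "F", "D"].foldl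
        (fun m r => if ("R" ++ r ++ "_1") = "RN_1" then m.setdefault "RN_1" r else m)
        (((PySem.Dict.empty.insert onx
            (if onx = "XC3g_1" then "XC3g_2" else "C")).setdefault "CX_0" "C").setdefault "NX_0" "N")).getD x x) := by
  simp only [List.foldl_cons, List.foldl_nil, String.reduceAppend, String.reduceEq, reduceIte,
    ne_eq, ite_not]
  simp only [getD_setdefault_cases, contains_setdefault, PySem.Dict.contains_insert,
    PySem.Dict.contains_empty, PySem.Dict.getD_insert, PySem.Dict.getD_empty,
    beq_iff_eq, Bool.or_false, Bool.or_eq_true]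
  split_ifs <;> subst_vars <;> simp_all

set_option maxHeartbeats 4000000 in
theorem point_eq_S (onx x : String) :
    (["H", "C", "O", "N", "S", "Cl", "Br", "I", "P", "F", "D"].foldl
      (fun y r => if ("R" ++ r ++ "_1") = "RS_1" then (if y = "RS_1" then r else y) else y)
      ((fun x => if x = "NX_0" then "N" else x)
        ((fun x => if x = "CX_0" then "C" else x)
          (if onx ≠ "XC3g_1" then (if x = onx then "C" else x)
           else if onx = "XC3g_1" then (if x = onx then "XC3g_2" else x) else x))))
    = ((["H", "C", "O", "N", "S", "Cl", "Br", "I", "P", "F", "D"].foldl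
        (fun m r => if ("R" ++ r ++ "_1") = "RS_1" then m.setdefault "RS_1" r else m)
        (((PySem.Dict.empty.insert onx
            (if onx = "XC3g_1" then "XC3g_2" else "C")).setdefault "CX_0" "C").setdefault "NX_0" "N")).getD x x) := by
  simp only [List.foldl_cons, List.foldl_nil, String.reduceAppend, String.reduceEq, reduceIte,
    ne_eq, ite_not]
  simp only [getD_setdefault_cases, contains_setdefault, PySem.Dict.contains_insert,
    PySem.Dict.contains_empty, PySem.Dict.getD_insert, PySem.Dict.getD_empty,
    beq_iff_eq, Bool.or_false, Bool.or_eq_true]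
  split_ifs <;> subst_vars <;> simp_all

set_option maxHeartbeats 4000000 in
theorem point_eq_Cl (onx x : String) :
    (["H", "C", "O", "N", "S", "Cl", "Br", "I", "P", "F", "D"].foldl
      (fun y r => if ("R" ++ r ++ "_1") = "RCl_1" then (if y = "RCl_1" then r else y) else y)
      ((fun x => if x = "NX_0" then "N" else x)
        ((fun x => if x = "CX_0" then "C" else x)
          (if onx ≠ "XC3g_1" then (if x = onx then "C" else x)
           else if onx = "XC3g_1" then (if x = onx then "XC3g_2" else x) else x))))
    = ((["H", "C", "O", "N", "S", "Cl", "Br", "I", "P", "F", "D"].foldl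
        (fun m r => if ("R" ++ r ++ "_1") = "RCl_1" then m.setdefault "RCl_1" r else m)
        (((PySem.Dict.empty.insert onx
            (if onx = "XC3g_1" then "XC3g_2" else "C")).setdefault "CX_0" "C").setdefault "NX_0" "N")).getD x x) := by
  simp only [List.foldl_cons, List.foldl_nil, String.reduceAppend, String.reduceEq, reduceIte,
    ne_eq, ite_not]
  simp only [getD_setdefault_cases, contains_setdefault, PySem.Dict.contains_insert,
    PySem.Dict.contains_empty, PySem.Dict.getD_insert, PySem.Dict.getD_empty,
    beq_iff_eq, Bool.or_false, Bool.or_eq_true]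
  split_ifs <;> subst_vars <;> simp_all

set_option maxHeartbeats 4000000 in
theorem point_eq_Br (onx x : String) :
    (["H", "C", "O", "N", "S", "Cl", "Br", "I", "P", "F", "D"].foldl
      (fun y r => if ("R" ++ r ++ "_1") = "RBr_1" then (if y = "RBr_1" then r else y) else y)
      ((fun x => if x = "NX_0" then "N" else x)
        ((fun x => if x = "CX_0" then "C" else x)
          (if onx ≠ "XC3g_1" then (if x = onx then "C" else x)
           else if onx = "XC3g_1" then (if x = onx then "XC3g_2" else x) else x))))
    = ((["H", "C", "O", "N", "S", "Cl", "Br", "I", "P", "F", "D"].foldl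
        (fun m r => if ("R" ++ r ++ "_1") = "RBr_1" then m.setdefault "RBr_1" r else m)
        (((PySem.Dict.empty.insert onx
            (if onx = "XC3g_1" then "XC3g_2" else "C")).setdefault "CX_0" "C").setdefault "NX_0" "N")).getD x x) := by
  simp only [List.foldl_cons, List.foldl_nil, String.reduceAppend, String.reduceEq, reduceIte,
    ne_eq, ite_not]
  simp only [getD_setdefault_cases, contains_setdefault, PySem.Dict.contains_insert,
    PySem.Dict.contains_empty, PySem.Dict.getD_insert, PySem.Dict.getD_empty,
    beq_iff_eq, Bool.or_false, Bool.or_eq_true]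
  split_ifs <;> subst_vars <;> simp_all

set_option maxHeartbeats 4000000 in
theorem point_eq_I (onx x : String) :
    (["H", "C", "O", "N", "S", "Cl", "Br", "I", "P", "F", "D"].foldl
      (fun y r => if ("R" ++ r ++ "_1") = "RI_1" then (if y = "RI_1" then r else y) else y)
      ((fun x => if x = "NX_0" then "N" else x)
        ((fun x => if x = "CX_0" then "C" else x)
          (if onx ≠ "XC3g_1" then (if x = onx then "C" else x)
           else if onx = "XC3g_1" then (if x = onx then "XC3g_2" else x) else x))))
    = ((["H", "C", "O", "N", "S", "Cl", "Br", "I", "P", "F", "D"].foldl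
        (fun m r => if ("R" ++ r ++ "_1") = "RI_1" then m.setdefault "RI_1" r else m)
        (((PySem.Dict.empty.insert onx
            (if onx = "XC3g_1" then "XC3g_2" else "C")).setdefault "CX_0" "C").setdefault "NX_0" "N")).getD x x) := by
  simp only [List.foldl_cons, List.foldl_nil, String.reduceAppend, String.reduceEq, reduceIte,
    ne_eq, ite_not]
  simp only [getD_setdefault_cases, contains_setdefault, PySem.Dict.contains_insert,
    PySem.Dict.contains_empty, PySem.Dict.getD_insert, PySem.Dict.getD_empty,
    beq_iff_eq, Bool.or_false, Bool.or_eq_true]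
  split_ifs <;> subst_vars <;> simp_all

set_option maxHeartbeats 4000000 in
theorem point_eq_P (onx x : String) :
    (["H", "C", "O", "N", "S", "Cl", "Br", "I", "P", "F", "D"].foldl
      (fun y r => if ("R" ++ r ++ "_1") = "RP_1" then (if y = "RP_1" then r else y) else y)
      ((fun x => if x = "NX_0" then "N" else x)
        ((fun x => if x = "CX_0" then "C" else x)
          (if onx ≠ "XC3g_1" then (if x = onx then "C" else x)
           else if onx = "XC3g_1" then (if x = onx then "XC3g_2" else x) else x))))
    = ((["H", "C", "O", "N", "S", "Cl", "Br", "I", "P", "F", "D"].foldl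
        (fun m r => if ("R" ++ r ++ "_1") = "RP_1" then m.setdefault "RP_1" r else m)
        (((PySem.Dict.empty.insert onx
            (if onx = "XC3g_1" then "XC3g_2" else "C")).setdefault "CX_0" "C").setdefault "NX_0" "N")).getD x x) := by
  simp only [List.foldl_cons, List.foldl_nil, String.reduceAppend, String.reduceEq, reduceIte,
    ne_eq, ite_not]
  simp only [getD_setdefault_cases, contains_setdefault, PySem.Dict.contains_insert,
    PySem.Dict.contains_empty, PySem.Dict.getD_insert, PySem.Dict.getD_empty,
    beq_iff_eq, Bool.or_false, Bool.or_eq_true]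
  split_ifs <;> subst_vars <;> simp_all

set_option maxHeartbeats 4000000 in
theorem point_eq_F (onx x : String) :
    (["H", "C", "O", "N", "S", "Cl", "Br", "I", "P", "F", "D"].foldl
      (fun y r => if ("R" ++ r ++ "_1") = "RF_1" then (if y = "RF_1" then r else y) else y)
      ((fun x => if x = "NX_0" then "N" else x)
        ((fun x => if x = "CX_0" then "C" else x)
          (if onx ≠ "XC3g_1" then (if x = onx then "C" else x)
           else if onx = "XC3g_1" then (if x = onx then "XC3g_2" else x) else x))))
    = ((["H", "C", "O", "N", "S", "Cl", "Br", "I", "P", "F", "D"].foldl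
        (fun m r => if ("R" ++ r ++ "_1") = "RF_1" then m.setdefault "RF_1" r else m)
        (((PySem.Dict.empty.insert onx
            (if onx = "XC3g_1" then "XC3g_2" else "C")).setdefault "CX_0" "C").setdefault "NX_0" "N")).getD x x) := by
  simp only [List.foldl_cons, List.foldl_nil, String.reduceAppend, String.reduceEq, reduceIte,
    ne_eq, ite_not]
  simp only [getD_setdefault_cases, contains_setdefault, PySem.Dict.contains_insert,
    PySem.Dict.contains_empty, PySem.Dict.getD_insert, PySem.Dict.getD_empty,
    beq_iff_eq, Bool.or_false, Bool.or_eq_true]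
  split_ifs <;> subst_vars <;> simp_all

set_option maxHeartbeats 4000000 in
theorem point_eq_D (onx x : String) :
    (["H", "C", "O", "N", "S", "Cl", "Br", "I", "P", "F", "D"].foldl
      (fun y r => if ("R" ++ r ++ "_1") = "RD_1" then (if y = "RD_1" then r else y) else y)
      ((fun x => if x = "NX_0" then "N" else x)
        ((fun x => if x = "CX_0" then "C" else x)
          (if onx ≠ "XC3g_1" then (if x = onx then "C" else x)
           else if onx = "XC3g_1" then (if x = onx then "XC3g_2" else x) else x))))
    = ((["H", "C", "O", "N", "S", "Cl", "Br", "I", "P", "F", "D"].foldl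
        (fun m r => if ("R" ++ r ++ "_1") = "RD_1" then m.setdefault "RD_1" r else m)
        (((PySem.Dict.empty.insert onx
            (if onx = "XC3g_1" then "XC3g_2" else "C")).setdefault "CX_0" "C").setdefault "NX_0" "N")).getD x x) := by
  simp only [List.foldl_cons, List.foldl_nil, String.reduceAppend, String.reduceEq, reduceIte,
    ne_eq, ite_not]
  simp only [getD_setdefault_cases, contains_setdefault, PySem.Dict.contains_insert,
    PySem.Dict.contains_empty, PySem.Dict.getD_insert, PySem.Dict.getD_empty,
    beq_iff_eq, Bool.or_false, Bool.or_eq_true]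
  split_ifs <;> subst_vars <;> simp_all

set_option maxHeartbeats 4000000 in
theorem point_eq_none (onx onr x : String) (h1 : ("R" ++ "H" ++ "_1") ≠ onr) (h2 : ("R" ++ "C" ++ "_1") ≠ onr) (h3 : ("R" ++ "O" ++ "_1") ≠ onr) (h4 : ("R" ++ "N" ++ "_1") ≠ onr) (h5 : ("R" ++ "S" ++ "_1") ≠ onr) (h6 : ("R" ++ "Cl" ++ "_1") ≠ onr) (h7 : ("R" ++ "Br" ++ "_1") ≠ onr) (h8 : ("R" ++ "I" ++ "_1") ≠ onr) (h9 : ("R" ++ "P" ++ "_1") ≠ onr) (h10 : ("R" ++ "F" ++ "_1") ≠ onr) (h11 : ("R" ++ "D" ++ "_1") ≠ onr) :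
    (["H", "C", "O", "N", "S", "Cl", "Br", "I", "P", "F", "D"].foldl
      (fun y r => if ("R" ++ r ++ "_1") = onr then (if y = onr then r else y) else y)
      ((fun x => if x = "NX_0" then "N" else x)
        ((fun x => if x = "CX_0" then "C" else x)
          (if onx ≠ "XC3g_1" then (if x = onx then "C" else x)
           else if onx = "XC3g_1" then (if x = onx then "XC3g_2" else x) else x))))
    = ((["H", "C", "O", "N", "S", "Cl", "Br", "I", "P", "F", "D"].foldl
        (fun m r => if ("R" ++ r ++ "_1") = onr then m.setdefault onr r else m)
        (((PySem.Dict.empty.insert onx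
            (if onx = "XC3g_1" then "XC3g_2" else "C")).setdefault "CX_0" "C").setdefault "NX_0" "N")).getD x x) := by
  simp only [List.foldl_cons, List.foldl_nil, if_neg h1, if_neg h2, if_neg h3, if_neg h4, if_neg h5, if_neg h6, if_neg h7, if_neg h8, if_neg h9, if_neg h10, if_neg h11, ne_eq, ite_not]
  simp only [getD_setdefault_cases, contains_setdefault, PySem.Dict.contains_insert,
    PySem.Dict.contains_empty, PySem.Dict.getD_insert, PySem.Dict.getD_empty,
    beq_iff_eq, Bool.or_false, Bool.or_eq_true]
  split_ifs <;> subst_vars <;> simp_all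

theorem point_eq (onx onr x : String) :
    (["H", "C", "O", "N", "S", "Cl", "Br", "I", "P", "F", "D"].foldl
      (fun y r => if ("R" ++ r ++ "_1") = onr then (if y = onr then r else y) else y)
      ((fun x => if x = "NX_0" then "N" else x)
        ((fun x => if x = "CX_0" then "C" else x)
          (if onx ≠ "XC3g_1" then (if x = onx then "C" else x)
           else if onx = "XC3g_1" then (if x = onx then "XC3g_2" else x) else x))))
    = ((["H", "C", "O", "N", "S", "Cl", "Br", "I", "P", "F", "D"].foldl
        (fun m r => if ("R" ++ r ++ "_1") = onr then m.setdefault onr r else m)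
        (((PySem.Dict.empty.insert onx
            (if onx = "XC3g_1" then "XC3g_2" else "C")).setdefault "CX_0" "C").setdefault "NX_0" "N")).getD x x) := by
  by_cases h1 : ("R" ++ "H" ++ "_1") = onr
  · subst h1; exact point_eq_H onx x
  by_cases h2 : ("R" ++ "C" ++ "_1") = onr
  · subst h2; exact point_eq_C onx x
  by_cases h3 : ("R" ++ "O" ++ "_1") = onr
  · subst h3; exact point_eq_O onx x
  by_cases h4 : ("R" ++ "N" ++ "_1") = onr
  · subst h4; exact point_eq_N onx x
  by_cases h5 : ("R" ++ "S" ++ "_1") = onr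
  · subst h5; exact point_eq_S onx x
  by_cases h6 : ("R" ++ "Cl" ++ "_1") = onr
  · subst h6; exact point_eq_Cl onx x
  by_cases h7 : ("R" ++ "Br" ++ "_1") = onr
  · subst h7; exact point_eq_Br onx x
  by_cases h8 : ("R" ++ "I" ++ "_1") = onr
  · subst h8; exact point_eq_I onx x
  by_cases h9 : ("R" ++ "P" ++ "_1") = onr
  · subst h9; exact point_eq_P onx x
  by_cases h10 : ("R" ++ "F" ++ "_1") = onr
  · subst h10; exact point_eq_F onx x
  by_cases h11 : ("R" ++ "D" ++ "_1") = onr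
  · subst h11; exact point_eq_D onx x
  exact point_eq_none onx onr x h1 h2 h3 h4 h5 h6 h7 h8 h9 h10 h11

-- ===== VERDICT (by name: the statement is the Claim_ definition above) =====
theorem atomname_change_after_link_c_spec : Claim_equal_atomname_change_after_link_c := by
  intro al onx onr _
  unfold Spec_atomname_change_after_link_c atomname_change_after_link_c atomname_change_after_link_c_alt
  rw [foldA]
  have hsplit :
      (if onx ≠ "XC3g_1" then al.map (fun x => if x = onx then "C" else x)
       else if onx = "XC3g_1" then al.map (fun x => if x = onx then "XC3g_2" else x) else al)
      = al.map (fun x =>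
          if onx ≠ "XC3g_1" then (if x = onx then "C" else x)
          else if onx = "XC3g_1" then (if x = onx then "XC3g_2" else x) else x) := by
    split_ifs <;> simp
  rw [hsplit]
  simp only [List.map_map]
  refine List.map_congr_left fun x hx => ?_
  exact point_eq onx onr x
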